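-- pv_equiv track=rewrite | github.com/KevinMcNamara0007/G.A8.1 | decode13/benchmark/build_edge_queries.py | _has_all
-- ===== SOURCE A (Python) =====
-- from typing import Dict, List, Set, Tuple
--
-- def _has_all(doc_tokens: Set[str], required: List[str]) -> bool:
--     """All required tokens present (prefix tolerance: 'regim' matches
--     'regime', 'regimes', etc.)."""
--     for r in required:
--         if r in doc_tokens:
--             continue
--         if any(t.startswith(r) for t in doc_tokens):
--             continue
--         return False
--     return True
-- ===== SOURCE B (Python) =====
-- def _has_all(doc_tokens, required):
--     """All required tokens present (prefix tolerance): build the set of all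
--     prefixes of the document tokens once, then check each required token by one set lookup."""
--     prefixes = set()
--     for t in doc_tokens:
--         for i in range(len(t) + 1):
--             prefixes.add(t[:i])
--     return all(r in prefixes for r in required)
-- ===== Notes on version B (the rewrite author's own statement) =====
-- stated objective: alternative
-- what changed: B precomputes the set of all prefixes of the document tokens once and answers each required token by a single set lookup, instead of A's inner any(startswith) scan over all doc tokens per required token; it trades the per-query scan for an upfront prefix-set build.
import Mathlib
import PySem

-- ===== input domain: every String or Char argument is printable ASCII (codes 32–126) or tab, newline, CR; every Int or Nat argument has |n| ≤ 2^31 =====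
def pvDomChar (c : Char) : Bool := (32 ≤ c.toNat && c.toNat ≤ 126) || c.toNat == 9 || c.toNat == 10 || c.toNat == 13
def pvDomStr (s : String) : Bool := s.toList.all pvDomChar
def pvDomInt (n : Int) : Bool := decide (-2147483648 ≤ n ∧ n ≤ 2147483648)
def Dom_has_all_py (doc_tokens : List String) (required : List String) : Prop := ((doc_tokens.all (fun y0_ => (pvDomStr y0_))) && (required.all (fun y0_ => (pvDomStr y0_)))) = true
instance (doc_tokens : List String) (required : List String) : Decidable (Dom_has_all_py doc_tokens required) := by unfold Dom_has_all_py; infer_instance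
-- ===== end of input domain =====

-- B replaces A's per-required-token scan over the doc tokens by a prefix set built once and looked up per token; objective: alternative algorithm.


-- ===== PORT A =====
-- the 'for r in required' loop with its early 'return False'
def hasAllLoopA (doc_tokens : List String) : List String → Bool
  | [] => true
  | r :: rs =>
      if doc_tokens.contains r then hasAllLoopA doc_tokens rs
      else if doc_tokens.any (fun t => PySem.Str.startswith t r) then hasAllLoopA doc_tokens rs
      else false

def has_all_py (doc_tokens : List String) (required : List String) : Bool :=
  hasAllLoopA doc_tokens required

-- ===== PORT B =====
-- 'prefixes = set(); for t in doc_tokens: for i in range(len(t)+1): prefixes.add(t[:i])'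
def has_all_py_alt (doc_tokens : List String) (required : List String) : Bool :=
  let prefixes : PySem.Set String :=
    doc_tokens.foldl
      (fun s t =>
        (PySem.List.pyRange 0 (PySem.Str.len t + 1) 1).foldl
          (fun s i => PySem.Set.add s (PySem.Str.slice t none (some i))) s)
      PySem.Set.empty
  required.all (fun r => PySem.Set.contains prefixes r)

-- ===== PRECONDITION & SPEC =====
def Spec_has_all_py (doc_tokens : List String) (required : List String) (out : Bool) : Prop := out = has_all_py_alt doc_tokens required
instance (doc_tokens : List String) (required : List String) (out : Bool) : Decidable (Spec_has_all_py doc_tokens required out) := by unfold Spec_has_all_py; infer_instance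

-- ===== CLAIM (what is proved, stated in full; the proofs are below) =====
def Claim_equal_has_all_py : Prop := ∀ (doc_tokens : List String) (required : List String), Dom_has_all_py doc_tokens required → Spec_has_all_py doc_tokens required (has_all_py doc_tokens required)

-- ===== LEMMAS AND PROOFS =====

-- membership in a set built by folding `add (f a)` over a list
theorem mem_foldl_add {α β : Type} [BEq β] [LawfulBEq β] (l : List α) (f : α → β)
    (s : PySem.Set β) (x : β) :
    x ∈ l.foldl (fun s a => PySem.Set.add s (f a)) s ↔ x ∈ s ∨ ∃ a ∈ l, f a = x := by
  induction l generalizing s with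
  | nil => simp
  | cons a l ih =>
      simp only [List.foldl_cons, ih, PySem.Set.mem_add, List.mem_cons]
      constructor
      · rintro ((h | h) | ⟨b, hb, rfl⟩)
        · exact Or.inl h
        · exact Or.inr ⟨a, Or.inl rfl, h.symm⟩
        · exact Or.inr ⟨b, Or.inr hb, rfl⟩
      · rintro (h | ⟨b, (rfl | hb), rfl⟩)
        · exact Or.inl (Or.inl h)
        · exact Or.inl (Or.inr rfl)
        · exact Or.inr ⟨b, hb, rfl⟩

-- membership in B's prefix set = some doc token starts with x
theorem mem_prefixSet (doc_tokens : List String) (x : String) :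
    (x ∈ doc_tokens.foldl
        (fun s t =>
          (PySem.List.pyRange 0 (PySem.Str.len t + 1) 1).foldl
            (fun s i => PySem.Set.add s (PySem.Str.slice t none (some i))) s)
        PySem.Set.empty)
    ↔ ∃ t ∈ doc_tokens, PySem.Str.startswith t x = true := by
  have hiff : ∀ t : String,
      (∃ i ∈ PySem.List.pyRange 0 (PySem.Str.len t + 1) 1,
        PySem.Str.slice t none (some i) = x) ↔ PySem.Str.startswith t x = true := by
    intro t
    rw [PySem.Str.startswith_eq, PySem.Chars.startswith_iff]
    constructor
    · rintro ⟨i, hi, rfl⟩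
      rw [PySem.List.mem_pyRange_one] at hi
      have h0 : (0:Int) ≤ i := hi.1
      simp only [PySem.Str.toList_slice, PySem.Chars.slice_eq_listSlice,
        PySem.List.slice_to _ h0]
      exact List.take_prefix _ _
    · intro h
      refine ⟨(x.toList.length : Int), ?_, ?_⟩
      · rw [PySem.List.mem_pyRange_one]
        have := h.length_le
        rw [PySem.Str.len_eq]
        omega
      · apply String.toList_inj.1
        simp only [PySem.Str.toList_slice, PySem.Chars.slice_eq_listSlice,
          PySem.List.slice_to _ (by positivity : (0:Int) ≤ (x.toList.length : Int))]
        rw [Int.toNat_natCast]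
        exact (List.prefix_iff_eq_take.1 h).symm
  suffices h : ∀ (doc : List String) (s : PySem.Set String),
      x ∈ doc.foldl
          (fun s t =>
            (PySem.List.pyRange 0 (PySem.Str.len t + 1) 1).foldl
              (fun s i => PySem.Set.add s (PySem.Str.slice t none (some i))) s)
          s
      ↔ x ∈ s ∨ ∃ t ∈ doc, PySem.Str.startswith t x = true by
    rw [h]
    simp [PySem.Set.empty]
  intro doc
  induction doc with
  | nil => simp
  | cons t ts ih =>
      intro s
      rw [List.foldl_cons, ih,
        mem_foldl_add (PySem.List.pyRange 0 (PySem.Str.len t + 1) 1)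
          (fun i => PySem.Str.slice t none (some i)) s x]
      simp only [List.mem_cons]
      constructor
      · rintro ((h | h) | ⟨u, hu, hsw⟩)
        · exact Or.inl h
        · exact Or.inr ⟨t, Or.inl rfl, (hiff t).1 h⟩
        · exact Or.inr ⟨u, Or.inr hu, hsw⟩
      · rintro (h | ⟨u, (rfl | hu), hsw⟩)
        · exact Or.inl (Or.inl h)
        · exact Or.inl (Or.inr ((hiff u).2 hsw))
        · exact Or.inr ⟨u, hu, hsw⟩

theorem loopA_eq_all (doc_tokens : List String) (required : List String) :
    hasAllLoopA doc_tokens required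
      = required.all (fun r => doc_tokens.any (fun t => PySem.Str.startswith t r)) := by
  induction required with
  | nil => rfl
  | cons r rs ih =>
      simp only [hasAllLoopA, List.all_cons]
      by_cases hc : doc_tokens.contains r
      · have hmem : r ∈ doc_tokens := by simpa using hc
        have hany : doc_tokens.any (fun t => PySem.Str.startswith t r) = true := by
          refine List.any_eq_true.2 ⟨r, hmem, ?_⟩
          rw [PySem.Str.startswith_eq, PySem.Chars.startswith_iff]
        rw [if_pos hc, hany, ih, Bool.true_and]
      · rw [if_neg hc]
        by_cases ha : doc_tokens.any (fun t => PySem.Str.startswith t r) = true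
        · rw [if_pos ha, ha, ih, Bool.true_and]
        · rw [if_neg ha, Bool.not_eq_true] at *
          rw [ha, Bool.false_and]

-- ===== VERDICT (by name: the statement is the Claim_ definition above) =====
theorem has_all_py_spec : Claim_equal_has_all_py := by
  intro doc_tokens required _
  unfold Spec_has_all_py has_all_py has_all_py_alt
  rw [loopA_eq_all]
  apply List.all_congr rfl
  intro r
  rw [Bool.eq_iff_iff, List.any_eq_true]
  have hc : (List.foldl
        (fun s t =>
          List.foldl (fun s i => PySem.Set.add s (PySem.Str.slice t none (some i))) s
            (PySem.List.pyRange 0 (PySem.Str.len t + 1) 1))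
        PySem.Set.empty doc_tokens).contains r = true
      ↔ r ∈ List.foldl
        (fun s t =>
          List.foldl (fun s i => PySem.Set.add s (PySem.Str.slice t none (some i))) s
            (PySem.List.pyRange 0 (PySem.Str.len t + 1) 1))
        PySem.Set.empty doc_tokens := by
    simp [PySem.Set.contains]
  rw [hc, mem_prefixSet doc_tokens r]
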